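-- pv_equiv track=rewrite | github.com/magical-obama/advent-of-code | 2020/Day 6/part_1.py | get_group_yes
-- ===== SOURCE A (Python) =====
-- def get_group_yes(group_ans):
--     group_yes = []
--     people = len(group_ans)
--     for i in range(people):
--         for x in range(len(group_ans[i])):
--             if group_ans[i][x] not in group_yes:
--                 group_yes.append(group_ans[i][x])
--     return len(group_yes)
-- ===== SOURCE B (Python) =====
-- def get_group_yes(group_ans):
--     chars = sorted(c for s in group_ans for c in s)
--     count = 0
--     prev = None
--     for c in chars:
--         if prev != c:
--             count += 1
--             prev = c
--     return count
-- ===== Notes on version B (the rewrite author's own statement) =====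
-- stated objective: alternative
-- what changed: Replaces the quadratic dedup-list (append on failed membership scan) with flatten, sort, and a single boundary-counting pass over the sorted characters.
import Mathlib
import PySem

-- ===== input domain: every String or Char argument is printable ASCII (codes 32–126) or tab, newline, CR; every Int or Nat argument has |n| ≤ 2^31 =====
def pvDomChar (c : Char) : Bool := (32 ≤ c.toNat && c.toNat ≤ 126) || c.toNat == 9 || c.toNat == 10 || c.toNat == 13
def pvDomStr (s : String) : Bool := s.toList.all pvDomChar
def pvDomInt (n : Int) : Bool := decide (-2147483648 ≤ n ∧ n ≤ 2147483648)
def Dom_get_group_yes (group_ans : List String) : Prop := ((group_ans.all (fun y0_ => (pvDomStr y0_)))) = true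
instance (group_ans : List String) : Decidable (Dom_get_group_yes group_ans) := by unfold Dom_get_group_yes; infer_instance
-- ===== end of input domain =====

-- B replaces A's quadratic dedup-list with flatten + sort + one boundary-counting pass (alternative algorithm, same return value).

-- ===== PORT A =====
-- for i / for x loops over the indices of group_ans / group_ans[i]: structural folds over the same strings/characters in the same order
def get_group_yes (group_ans : List String) : Int :=
  ((group_ans.foldl
      (fun acc s => s.toList.foldl (fun acc c => if c ∈ acc then acc else acc ++ [c]) acc)
      ([] : List Char)).length : Int)

-- ===== PORT B =====
-- the 'for c in chars' loop of Source B carrying (count, prev)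
def ggyCount : Option Char → Nat → List Char → Nat
  | _, n, [] => n
  | prev, n, c :: t => if prev = some c then ggyCount prev n t else ggyCount (some c) (n + 1) t

def get_group_yes_alt (group_ans : List String) : Int :=
  ((ggyCount none 0 (PySem.List.sorted (group_ans.flatMap String.toList) (fun x => x) false)) : Int)

-- ===== PRECONDITION & SPEC =====
def Spec_get_group_yes (group_ans : List String) (out : Int) : Prop := out = get_group_yes_alt group_ans
instance (group_ans : List String) (out : Int) : Decidable (Spec_get_group_yes group_ans out) := by unfold Spec_get_group_yes; infer_instance

-- ===== CLAIM (what is proved, stated in full; the proofs are below) =====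
def Claim_equal_get_group_yes : Prop := ∀ (group_ans : List String), Dom_get_group_yes group_ans → Spec_get_group_yes group_ans (get_group_yes group_ans)

-- ===== LEMMAS AND PROOFS =====

-- A's dedup fold: final length = cardinality of the union of accumulator and remaining characters
lemma ggy_foldA_length (l acc : List Char) (h : acc.Nodup) :
    (l.foldl (fun acc c => if c ∈ acc then acc else acc ++ [c]) acc).length
      = (acc.toFinset ∪ l.toFinset).card := by
  induction l generalizing acc with
  | nil => simp [List.toFinset_card_of_nodup h]
  | cons c t ih =>
    by_cases hc : c ∈ acc
    · have hu : acc.toFinset ∪ (c :: t).toFinset = acc.toFinset ∪ t.toFinset := by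
        ext x; simp only [Finset.mem_union, List.mem_toFinset, List.mem_cons]
        constructor
        · rintro (hx | rfl | hx)
          · exact Or.inl hx
          · exact Or.inl hc
          · exact Or.inr hx
        · rintro (hx | hx)
          · exact Or.inl hx
          · exact Or.inr (Or.inr hx)
      rw [List.foldl_cons]
      simp only [hc, if_pos]
      rw [ih acc h, hu]
    · have hnd : (acc ++ [c]).Nodup := by
        rw [List.nodup_append]
        refine ⟨h, List.nodup_singleton c, ?_⟩
        intro a ha b hb
        rw [List.mem_singleton] at hb
        subst hb
        exact fun he => hc (he ▸ ha)
      have hu : (acc ++ [c]).toFinset ∪ t.toFinset = acc.toFinset ∪ (c :: t).toFinset := by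
        ext x; simp only [Finset.mem_union, List.mem_toFinset, List.mem_append,
          List.mem_cons]
        tauto
      rw [List.foldl_cons]
      simp only [hc, if_neg, not_false_iff]
      rw [ih (acc ++ [c]) hnd, hu]

-- the nested index loops of A visit exactly the flattened character list
lemma ggy_foldA_flatMap (gs : List String) (acc : List Char) :
    gs.foldl (fun acc s => s.toList.foldl (fun acc c => if c ∈ acc then acc else acc ++ [c]) acc) acc
      = (gs.flatMap String.toList).foldl (fun acc c => if c ∈ acc then acc else acc ++ [c]) acc := by
  induction gs generalizing acc with
  | nil => simp
  | cons s t ih => simp [List.flatMap_cons, List.foldl_append, ih]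

-- card of insert via erase (duplicate-tolerant)
lemma ggy_card_insert (c : Char) (s : Finset Char) :
    (insert c s).card = (s.erase c).card + 1 := by
  have h1 : insert c s = insert c (s.erase c) := by
    ext x
    simp only [Finset.mem_insert, Finset.mem_erase]
    constructor
    · rintro (rfl | hx)
      · exact Or.inl rfl
      · by_cases hxc : x = c
        · exact Or.inl hxc
        · exact Or.inr ⟨hxc, hx⟩
    · rintro (rfl | ⟨_, hx⟩)
      · exact Or.inl rfl
      · exact Or.inr hx
  rw [h1, Finset.card_insert_of_notMem (Finset.notMem_erase c _)]

-- B's boundary count on a sorted tail, previous character p below everything remaining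
lemma ggy_count_some (l : List Char) (hs : l.Pairwise (· ≤ ·)) :
    ∀ (p : Char) (n : Nat), (∀ x ∈ l, p ≤ x) → ggyCount (some p) n l = n + (l.toFinset.erase p).card := by
  induction l with
  | nil =>
    intro p n _
    show n = n + (((List.toFinset ([] : List Char)).erase p)).card
    simp
  | cons c t ih =>
    intro p n hp
    rcases List.pairwise_cons.mp hs with ⟨hct, ht⟩
    by_cases hpc : p = c
    · subst hpc
      have := ih ht p n (fun x hx => hct x hx)
      simp [ggyCount, this, Finset.erase_insert_eq_erase]
    · have hplt : p < c := lt_of_le_of_ne (hp c (by simp)) hpc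
      have hpt : p ∉ t.toFinset := by
        simp only [List.mem_toFinset]
        intro hmem
        exact absurd (lt_of_lt_of_le hplt (hct p hmem)) (lt_irrefl p)
      have := ih ht c (n + 1) hct
      have herase : ((c :: t).toFinset).erase p = insert c t.toFinset := by
        simp only [List.toFinset_cons]
        rw [Finset.erase_eq_self.mpr]
        simp only [Finset.mem_insert]
        rintro (rfl | hx)
        · exact hpc rfl
        · exact hpt hx
      have hcard := ggy_card_insert c t.toFinset
      simp only [ggyCount, Option.some.injEq] at *
      rw [if_neg hpc, this, herase, hcard]
      omega

lemma ggy_count_none (l : List Char) (hs : l.Pairwise (· ≤ ·)) :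
    ggyCount none 0 l = l.toFinset.card := by
  cases l with
  | nil => simp [ggyCount]
  | cons c t =>
    rcases List.pairwise_cons.mp hs with ⟨hct, ht⟩
    have := ggy_count_some t ht c 1 hct
    simp only [ggyCount, reduceCtorEq, if_false, this, List.toFinset_cons, ggy_card_insert]
    omega

-- ===== VERDICT (by name: the statement is the Claim_ definition above) =====
theorem get_group_yes_spec : Claim_equal_get_group_yes := by
  intro group_ans _
  show _ = _
  unfold get_group_yes get_group_yes_alt
  set cs := group_ans.flatMap String.toList with hcs
  have hA : (group_ans.foldl
      (fun acc s => s.toList.foldl (fun acc c => if c ∈ acc then acc else acc ++ [c]) acc)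
      ([] : List Char)).length = cs.toFinset.card := by
    rw [ggy_foldA_flatMap, ggy_foldA_length cs [] List.nodup_nil]
    simp
  have hperm : (PySem.List.sorted cs (fun x => x) false).Perm cs := PySem.List.sorted_perm cs (fun x => x) false
  have hpw : (PySem.List.sorted cs (fun x => x) false).Pairwise (· ≤ ·) := by
    have := PySem.List.sorted_pairwise (xs := cs) (key := fun x : Char => x)
    simpa using this
  have hB : ggyCount none 0 (PySem.List.sorted cs (fun x => x) false) = cs.toFinset.card := by
    rw [ggy_count_none _ hpw, List.toFinset_eq_of_perm _ _ hperm]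
  rw [hA, hB]
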